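-- pv_equiv track=rewrite | github.com/julian31186/competitive-programming | lc/3011.py | canSortArray
-- ===== SOURCE A (Python) =====
-- from typing import List
--
-- def canSortArray(nums: List[int]) -> bool:
--     for i in range(len(nums)):
--         for j in range(len(nums) - 1):
--             if nums[j] > nums[j + 1]:
--                 if nums[j].bit_count() == nums[j + 1].bit_count():
--                     nums[j],nums[j + 1] = nums[j + 1],nums[j]
--                 else:
--                     return False
--     return True
-- ===== SOURCE B (Python) =====
-- from typing import List
--
-- def canSortArray(nums: List[int]) -> bool:
--     # single left-to-right scan over maximal runs of equal popcount:
--     # every element must be >= the max of all elements in completed runs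
--     if not nums:
--         return True
--     prev_max = None          # max over all completed popcount-runs
--     cur_pc = nums[0].bit_count()
--     cur_max = nums[0]
--     for x in nums[1:]:
--         p = x.bit_count()
--         if p != cur_pc:
--             prev_max = cur_max if prev_max is None else max(prev_max, cur_max)
--             cur_pc = p
--             cur_max = x
--         else:
--             cur_max = max(cur_max, x)
--         if prev_max is not None and x < prev_max:
--             return False
--     return True
-- ===== Notes on version B (the rewrite author's own statement) =====
-- stated objective: faster
-- what changed: Replaces the n-full-pass constrained bubble sort (nested loops with adjacent swaps) by a single linear scan over maximal equal-popcount runs that checks every element against the running maximum of completed runs.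
import Mathlib
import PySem

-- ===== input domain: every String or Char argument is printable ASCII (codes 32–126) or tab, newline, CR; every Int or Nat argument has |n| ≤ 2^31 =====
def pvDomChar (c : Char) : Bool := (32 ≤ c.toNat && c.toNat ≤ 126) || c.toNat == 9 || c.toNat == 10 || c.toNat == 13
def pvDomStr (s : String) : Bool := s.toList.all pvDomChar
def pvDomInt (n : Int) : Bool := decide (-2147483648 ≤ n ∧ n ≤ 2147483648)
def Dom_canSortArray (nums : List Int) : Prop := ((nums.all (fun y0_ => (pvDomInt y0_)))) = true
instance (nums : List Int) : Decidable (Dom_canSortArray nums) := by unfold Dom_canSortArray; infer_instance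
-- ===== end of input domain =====

-- B replaces A's n-full-pass constrained bubble sort by one linear scan over equal-popcount
-- runs (objective: faster). Equivalence is about the RETURN value only: Python A sorts its
-- argument in place as a side effect, B does not mutate it.

-- shared model of Python's int.bit_count()
def pyPc (n : Int) : Nat := PySem.Int.bitCount n

-- ===== PORT A =====
-- inner loop 'for j in range(len(nums) - 1)' over the mutating list, with early return False
def passA : List Int → Option (List Int)
  | [] => some []
  | [x] => some [x]
  | a :: b :: t =>
    if a > b then
      if pyPc a = pyPc b then (passA (a :: t)).map (fun r => b :: r)
      else none
    else (passA (b :: t)).map (fun r => a :: r)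
termination_by l => l.length

-- outer loop 'for i in range(len(nums))' (swaps keep the length constant)
def outerA : Nat → List Int → Bool
  | 0, _ => true
  | k + 1, l =>
    match passA l with
    | none => false
    | some l' => outerA k l'

def canSortArray (nums : List Int) : Bool := outerA nums.length nums

-- ===== PORT B =====
-- 'prev_max is not None and x < prev_max'
def ltPm : Option Int → Int → Bool
  | none, _ => false
  | some m, x => x < m

-- 'cur_max if prev_max is None else max(prev_max, cur_max)'
def bumpPm : Option Int → Int → Int
  | none, c => c
  | some m, c => max m c

-- the loop 'for x in nums[1:]' with state (prev_max, cur_pc, cur_max)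
def okAux (pm : Option Int) (cpc : Nat) (cmax : Int) : List Int → Bool
  | [] => true
  | x :: t =>
    if pyPc x = cpc then
      if ltPm pm x then false else okAux pm cpc (max cmax x) t
    else
      if x < bumpPm pm cmax then false
      else okAux (some (bumpPm pm cmax)) (pyPc x) x t

def canSortArray_alt : List Int → Bool
  | [] => true
  | x :: t => okAux none (pyPc x) x t

-- ===== PRECONDITION & SPEC =====
def Spec_canSortArray (nums : List Int) (out : Bool) : Prop := out = canSortArray_alt nums
instance (nums : List Int) (out : Bool) : Decidable (Spec_canSortArray nums out) := by unfold Spec_canSortArray; infer_instance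

-- ===== CLAIM (what is proved, stated in full; the proofs are below) =====
def Claim_equal_canSortArray : Prop := ∀ (nums : List Int), Dom_canSortArray nums → Spec_canSortArray nums (canSortArray nums)

-- ===== LEMMAS AND PROOFS =====

lemma okAux_cons (pm : Option Int) (cpc : Nat) (cmax x : Int) (t : List Int) :
    okAux pm cpc cmax (x :: t) =
      if pyPc x = cpc then
        (if ltPm pm x then false else okAux pm cpc (max cmax x) t)
      else
        (if x < bumpPm pm cmax then false
         else okAux (some (bumpPm pm cmax)) (pyPc x) x t) := rfl

lemma okAux_swap (pm : Option Int) (cpc : Nat) (cmax a b : Int) (t : List Int)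
    (h : pyPc a = pyPc b) :
    okAux pm cpc cmax (a :: b :: t) = okAux pm cpc cmax (b :: a :: t) := by
  by_cases hc : pyPc b = cpc
  · have ha : pyPc a = cpc := h.trans hc
    simp only [okAux, ha, hc, if_true, ite_true, ltPm]
    rw [max_right_comm]
    split_ifs <;> rfl
  · have ha : ¬ pyPc a = cpc := fun hh => hc (h ▸ hh)
    simp only [okAux, ha, hc, if_false, h, eq_self_iff_true, if_true, ltPm]
    rw [max_comm a b]
    split_ifs <;> first | rfl | (simp only [decide_eq_true_eq] at *; omega)

lemma pass_ok_aux : ∀ (l l' : List Int), passA l = some l' →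
    ∀ (pm : Option Int) (cpc : Nat) (cmax : Int),
      okAux pm cpc cmax l = okAux pm cpc cmax l' := by
  intro l
  fun_induction passA l with
  | case1 => intro l' h pm cpc cmax; simp [passA] at h; subst h; rfl
  | case2 x => intro l' h pm cpc cmax; simp [passA] at h; subst h; rfl
  | case3 a b t hgt hpc ih =>
    intro l' h pm cpc cmax
    simp only [passA, if_pos hgt, if_pos hpc, Option.map_eq_some_iff] at h
    obtain ⟨r, hr, rfl⟩ := h
    rw [okAux_swap pm cpc cmax a b t hpc,
        okAux_cons pm cpc cmax b (a :: t), okAux_cons pm cpc cmax b r]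
    split_ifs <;> first | rfl | exact ih r hr _ _ _
  | case4 a b t hgt hpc =>
    intro l' h; simp [passA, if_pos hgt, hpc] at h
  | case5 a b t hle ih =>
    intro l' h pm cpc cmax
    simp only [passA, if_neg hle, Option.map_eq_some_iff] at h
    obtain ⟨r, hr, rfl⟩ := h
    rw [okAux_cons pm cpc cmax a (b :: t), okAux_cons pm cpc cmax a r]
    split_ifs <;> first | rfl | exact ih r hr _ _ _

lemma pass_alt (l l' : List Int) (h : passA l = some l') :
    canSortArray_alt l = canSortArray_alt l' := by
  match l with
  | [] => simp [passA] at h; subst h; rfl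
  | [x] => simp [passA] at h; subst h; rfl
  | a :: b :: t =>
    by_cases hgt : a > b
    · by_cases hpc : pyPc a = pyPc b
      · simp only [passA, if_pos hgt, if_pos hpc, Option.map_eq_some_iff] at h
        obtain ⟨r, hr, rfl⟩ := h
        show okAux none (pyPc a) a (b :: t) = okAux none (pyPc b) b r
        rw [okAux_cons, if_pos (hpc.symm ▸ rfl : pyPc b = pyPc a)]
        simp only [ltPm, if_false, Bool.false_eq_true, ite_false]
        rw [max_eq_left (le_of_lt hgt)]
        rw [← pass_ok_aux _ _ hr none (pyPc b) b]
        rw [okAux_cons, if_pos hpc]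
        simp only [ltPm, Bool.false_eq_true, if_false, ite_false]
        rw [max_eq_right (le_of_lt hgt), hpc]
      · simp [passA, if_pos hgt, hpc] at h
    · simp only [passA, if_neg hgt, Option.map_eq_some_iff] at h
      obtain ⟨r, hr, rfl⟩ := h
      show okAux none (pyPc a) a (b :: t) = okAux none (pyPc a) a r
      exact pass_ok_aux _ _ hr _ _ _

lemma le_bumpPm (pm : Option Int) (c : Int) : c ≤ bumpPm pm c := by
  cases pm <;> simp [bumpPm]

lemma pass_some : ∀ (t : List Int) (a : Int) (pm : Option Int),
    okAux pm (pyPc a) a t = true → ∃ r, passA (a :: t) = some r := by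
  intro t
  induction t with
  | nil => intro a pm _; exact ⟨[a], by simp [passA]⟩
  | cons b t' ih =>
    intro a pm h
    rw [okAux_cons] at h
    by_cases hpc : pyPc b = pyPc a
    · rw [if_pos hpc] at h
      split_ifs at h with hlt
      by_cases hgt : a > b
      · have hx : max a b = a := max_eq_left (le_of_lt hgt)
        rw [hx] at h
        obtain ⟨r, hr⟩ := ih a pm h
        exact ⟨b :: r, by simp [passA, if_pos hgt, hpc.symm, hr]⟩
      · have hx : max a b = b := max_eq_right (by omega)
        rw [hx] at h
        obtain ⟨r, hr⟩ := ih b pm (by rw [← hpc] at h; exact h)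
        exact ⟨a :: r, by simp [passA, show ¬ b < a by omega, hr]⟩
    · rw [if_neg hpc] at h
      split_ifs at h with hlt
      have hab : a ≤ b := le_trans (le_bumpPm pm a) (by omega)
      obtain ⟨r, hr⟩ := ih b _ h
      exact ⟨a :: r, by simp [passA, show ¬ b < a by omega, hr]⟩

lemma pass_sorted : ∀ (s : List Int) (a : Int), List.IsChain (· ≤ ·) (a :: s) →
    passA (a :: s) = some (a :: s) := by
  intro s
  induction s with
  | nil => intro a _; simp [passA]
  | cons b s' ih =>
    intro a hch
    rw [List.isChain_cons_cons] at hch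
    simp [passA, show ¬ b < a by omega, ih b hch.2]

lemma sorted_okAux : ∀ (t : List Int) (pm : Option Int) (cpc : Nat) (cmax : Int),
    List.IsChain (· ≤ ·) (cmax :: t) → (∀ m, pm = some m → m ≤ cmax) →
    okAux pm cpc cmax t = true := by
  intro t
  induction t with
  | nil => intro pm cpc cmax _ _; rfl
  | cons x t' ih =>
    intro pm cpc cmax hch hpm
    rw [List.isChain_cons_cons] at hch
    have hcx : cmax ≤ x := hch.1
    rw [okAux_cons]
    by_cases hpc : pyPc x = cpc
    · rw [if_pos hpc]
      have hl : ltPm pm x = false := by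
        cases pm with
        | none => rfl
        | some m => simp [ltPm]; have := hpm m rfl; omega
      rw [hl]
      simp only [Bool.false_eq_true, if_false, ite_false]
      rw [max_eq_right hcx]
      exact ih pm cpc x hch.2 (fun m hm => le_trans (hpm m hm) hcx)
    · rw [if_neg hpc]
      have hb : bumpPm pm cmax ≤ x := by
        cases pm with
        | none => simpa [bumpPm] using hcx
        | some m => simp [bumpPm]; exact ⟨le_trans (hpm m rfl) hcx, hcx⟩
      rw [if_neg (by omega)]
      exact ih _ _ x hch.2 (by intro m hm; injection hm with hm; omega)

lemma sorted_alt (l : List Int) (h : List.IsChain (· ≤ ·) l) : canSortArray_alt l = true := by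
  cases l with
  | nil => rfl
  | cons x t => exact sorted_okAux t none (pyPc x) x h (by simp)

lemma pass_shape : ∀ (t : List Int) (a : Int) (s r : List Int),
    List.IsChain (· ≤ ·) s → (∀ y ∈ s, a ≤ y) → (∀ x ∈ t, ∀ y ∈ s, x ≤ y) →
    passA (a :: (t ++ s)) = some r →
    ∃ u M, r = u ++ M :: s ∧ a ≤ M ∧ (∀ x ∈ u, x ≤ M) ∧ (∀ y ∈ s, M ≤ y) ∧
      u.length = t.length := by
  intro t
  induction t with
  | nil =>
    intro a s r hs has _ hp
    rw [List.nil_append] at hp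
    have hch : List.IsChain (· ≤ ·) (a :: s) :=
      List.IsChain.cons hs (fun y hy => has y (List.mem_of_mem_head? hy))
    rw [pass_sorted s a hch] at hp
    refine ⟨[], a, by simpa using hp.symm, le_refl a, by simp, has, rfl⟩
  | cons b t' ih =>
    intro a s r hs has hts hp
    by_cases hgt : b < a
    · by_cases hpc : pyPc a = pyPc b
      · simp only [List.cons_append, passA, if_pos hgt, if_pos hpc,
          Option.map_eq_some_iff] at hp
        obtain ⟨r', hr', rfl⟩ := hp
        obtain ⟨u, M, rfl, haM, huM, hMs, hlen⟩ :=
          ih a s r' hs has (fun x hx => hts x (List.mem_cons_of_mem b hx)) hr'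
        refine ⟨b :: u, M, rfl, haM, ?_, hMs, by simp [hlen]⟩
        intro x hx
        rcases List.mem_cons.mp hx with rfl | hx
        · omega
        · exact huM x hx
      · simp [List.cons_append, passA, if_pos hgt, hpc] at hp
    · simp only [List.cons_append, passA, if_neg hgt, Option.map_eq_some_iff] at hp
      obtain ⟨r', hr', rfl⟩ := hp
      have hbs : ∀ y ∈ s, b ≤ y := hts b (List.mem_cons_self)
      obtain ⟨u, M, rfl, hbM, huM, hMs, hlen⟩ :=
        ih b s r' hs hbs (fun x hx => hts x (List.mem_cons_of_mem b hx)) hr'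
      refine ⟨a :: u, M, rfl, by omega, ?_, hMs, by simp [hlen]⟩
      intro x hx
      rcases List.mem_cons.mp hx with rfl | hx
      · omega
      · exact huM x hx

lemma outer_ok : ∀ (k : Nat) (t s : List Int), List.IsChain (· ≤ ·) s →
    (∀ x ∈ t, ∀ y ∈ s, x ≤ y) → t.length ≤ k → outerA k (t ++ s) = true →
    canSortArray_alt (t ++ s) = true := by
  intro k
  induction k with
  | zero =>
    intro t s hs _ hlen _
    rw [List.eq_nil_of_length_eq_zero (by omega : t.length = 0)]
    exact sorted_alt s hs
  | succ k ih =>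
    intro t s hs hts hlen hout
    cases t with
    | nil => exact sorted_alt s hs
    | cons a t' =>
      cases hp : passA (a :: (t' ++ s)) with
      | none => rw [show ((a :: t') ++ s) = a :: (t' ++ s) from rfl] at hout;
                simp [outerA, hp] at hout
      | some r =>
        rw [show ((a :: t') ++ s) = a :: (t' ++ s) from rfl] at hout
        simp only [outerA, hp] at hout
        obtain ⟨u, M, rfl, haM, huM, hMs, hlen'⟩ :=
          pass_shape t' a s r hs (hts a List.mem_cons_self)
            (fun x hx => hts x (List.mem_cons_of_mem a hx)) hp
        have hchM : List.IsChain (· ≤ ·) (M :: s) :=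
          List.IsChain.cons hs (fun y hy => hMs y (List.mem_of_mem_head? hy))
        have htsM : ∀ x ∈ u, ∀ y ∈ M :: s, x ≤ y := by
          intro x hx y hy
          rcases List.mem_cons.mp hy with rfl | hy
          · exact huM x hx
          · exact le_trans (huM x hx) (hMs y hy)
        have := ih u (M :: s) hchM htsM
          (by simp only [List.length_cons] at hlen; omega) hout
        exact (pass_alt _ _ hp).trans this

lemma alt_outer : ∀ (k : Nat) (l : List Int), canSortArray_alt l = true →
    outerA k l = true := by
  intro k
  induction k with
  | zero => intro l _; rfl
  | succ k ih =>
    intro l h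
    cases l with
    | nil => simp only [outerA, passA]; exact ih [] h
    | cons x t =>
      obtain ⟨r, hr⟩ := pass_some t x none h
      simp only [outerA, hr]
      exact ih r ((pass_alt _ _ hr) ▸ h)

lemma main_eq (l : List Int) : canSortArray l = canSortArray_alt l := by
  cases hb : canSortArray_alt l with
  | true => exact alt_outer l.length l hb
  | false =>
    cases hA : canSortArray l with
    | false => rfl
    | true =>
      have := outer_ok l.length l [] (by simp) (by simp) (by simp)
        (by simpa [canSortArray] using hA)
      rw [List.append_nil] at this
      rw [hb] at this
      exact this.symm

-- ===== VERDICT (by name: the statement is the Claim_ definition above) =====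
theorem canSortArray_spec : Claim_equal_canSortArray := by
  intro nums _
  unfold Spec_canSortArray
  exact main_eq nums
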